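-- pv_equiv track=rewrite | github.com/jpsamuelson/aurora-icepower-booster | scripts/pcb/build_pcb_v4.py | build_net_table
-- ===== SOURCE A (Python) =====
-- def build_net_table(comps):
--     all_nets = set()
--     for c in comps.values():
--         for net in c['pins'].values():
--             all_nets.add(net)
--     all_nets.discard('')
--     net_list  = sorted(all_nets)
--     net_to_id = {n: i + 1 for i, n in enumerate(net_list)}
--     net_to_id[''] = 0
--
--     lines = ['\t(net 0 "")']
--     for net, nid in sorted(net_to_id.items(), key=lambda x: x[1]):
--         if net:
--             lines.append(f'\t(net {nid} "{net.replace(chr(34), chr(92)+chr(34))}")')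
--     return '\n'.join(lines) + '\n', net_to_id
-- ===== SOURCE B (Python) =====
-- # B: sort the raw multiset of net names once and assign ids with a linear
-- # adjacent-dedup scan (no set, no dict comprehension, no second sort).
-- def build_net_table(comps):
--     nets = []
--     for c in comps.values():
--         nets.extend(c['pins'].values())
--     nets.sort()
--     lines = ['\t(net 0 "")']
--     net_to_id = {}
--     prev = ''
--     nid = 0
--     for n in nets:
--         if n != prev:
--             nid += 1
--             net_to_id[n] = nid
--             lines.append('\t(net {} "{}")'.format(nid, n.replace('"', '\\"')))
--             prev = n
--     net_to_id[''] = 0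
--     return '\n'.join(lines) + '\n', net_to_id
-- ===== Notes on version B (the rewrite author's own statement) =====
-- stated objective: alternative
-- what changed: B drops A's hash set, dict comprehension and second sort over net_to_id.items(): it sorts the raw multiset of net names once and assigns ids, fills net_to_id and emits the lines in a single adjacent-dedup scan (prev/nid accumulators).
import Mathlib
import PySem

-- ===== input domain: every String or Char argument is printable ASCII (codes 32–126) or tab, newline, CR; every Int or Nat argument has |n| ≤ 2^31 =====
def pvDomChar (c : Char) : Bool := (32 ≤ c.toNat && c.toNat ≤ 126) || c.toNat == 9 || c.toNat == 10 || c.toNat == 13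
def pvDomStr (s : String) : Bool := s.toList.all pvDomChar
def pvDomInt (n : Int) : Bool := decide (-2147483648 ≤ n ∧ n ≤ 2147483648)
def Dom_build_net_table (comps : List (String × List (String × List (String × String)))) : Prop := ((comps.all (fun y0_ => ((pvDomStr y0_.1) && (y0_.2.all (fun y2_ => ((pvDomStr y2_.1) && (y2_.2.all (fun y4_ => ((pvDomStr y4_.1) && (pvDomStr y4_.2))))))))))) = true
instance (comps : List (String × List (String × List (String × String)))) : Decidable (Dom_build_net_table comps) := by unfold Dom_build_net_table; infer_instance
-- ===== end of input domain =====

-- B replaces A's hash set + dict comprehension + second sort by one sort of the raw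
-- multiset of net names followed by a single adjacent-dedup scan (prev/nid accumulators).

-- shared helpers: both Pythons read c['pins'] (first-match lookup) and format the same line
def pvPins (c : List (String × List (String × String))) : List (String × String) :=
  (PySem.Dict.mk c).getD "pins" []

def pvNetLine (nid : Int) (net : String) : String :=
  "\t(net " ++ PySem.Int.toStr nid ++ " \"" ++ PySem.Str.replace net "\"" "\\\"" ++ "\")"

-- ===== PORT A =====
def build_net_table (comps : List (String × List (String × List (String × String)))) : String × (List (String × Int)) :=
  let all_nets : PySem.Set String :=
    comps.foldl (fun s p => ((pvPins p.2).map (·.2)).foldl (fun s net => s.add net) s) PySem.Set.empty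
  let all_nets := all_nets.discard ""
  let net_list := PySem.List.sorted all_nets (fun n => n)
  let net_to_id := (PySem.List.enumerate net_list).foldl
      (fun d p => d.insert p.2 (p.1 + 1)) PySem.Dict.empty
  let net_to_id := net_to_id.insert "" 0
  let lines := (PySem.List.sorted net_to_id.items (fun x => x.2)).foldl
      (fun ls p => if (p.1 != "") = true then ls ++ [pvNetLine p.2 p.1] else ls)
      ["\t(net 0 \"\")"]
  (PySem.Str.join "\n" lines ++ "\n", net_to_id.items)

-- ===== PORT B =====
def build_net_table_alt (comps : List (String × List (String × List (String × String)))) : String × (List (String × Int)) :=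
  let nets := comps.foldl (fun acc p => acc ++ (pvPins p.2).map (·.2)) []
  let nets := PySem.List.sorted nets (fun n => n)
  let st := nets.foldl
      (fun (st : (List String × PySem.Dict String Int) × String × Int) n =>
        if (n != st.2.1) = true then
          ((st.1.1 ++ [pvNetLine (st.2.2 + 1) n], st.1.2.insert n (st.2.2 + 1)), (n, st.2.2 + 1))
        else st)
      ((["\t(net 0 \"\")"], PySem.Dict.empty), ("", 0))
  let net_to_id := st.1.2.insert "" 0
  (PySem.Str.join "\n" st.1.1 ++ "\n", net_to_id.items)

-- ===== PRECONDITION & SPEC =====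
-- Pre_ excludes exactly the inputs where Python A raises KeyError: a component dict without a 'pins' key.
def Pre_build_net_table (comps : List (String × List (String × List (String × String)))) : Prop :=
  (comps.all (fun p => p.2.any (fun q => q.1 == "pins"))) = true
instance (comps : List (String × List (String × List (String × String)))) : Decidable (Pre_build_net_table comps) := by unfold Pre_build_net_table; infer_instance

def pvWitness_build_net_table : (List (String × List (String × List (String × String)))) :=
  [("U1", [("pins", [("1", "GND"), ("2", "VCC")])])]

def Spec_build_net_table (comps : List (String × List (String × List (String × String)))) (out : String × (List (String × Int))) : Prop := out = build_net_table_alt comps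
instance (comps : List (String × List (String × List (String × String)))) (out : String × (List (String × Int))) : Decidable (Spec_build_net_table comps out) := by unfold Spec_build_net_table; infer_instance

-- ===== CLAIM (what is proved, stated in full; the proofs are below) =====
def Claim_equal_build_net_table : Prop := ∀ (comps : List (String × List (String × List (String × String)))), Dom_build_net_table comps → Pre_build_net_table comps → Spec_build_net_table comps (build_net_table comps)

-- ===== LEMMAS AND PROOFS =====

-- the raw stream of nets, in traversal order (both Pythons traverse comps the same way)
def pvNets (comps : List (String × List (String × List (String × String)))) : List String :=
  comps.flatMap (fun p => (pvPins p.2).map (·.2))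

-- adjacent dedup relative to a previous value: the list of elements B's scan emits
def pvDedup (p : String) : List String → List String
  | [] => []
  | x :: xs => if x = p then pvDedup p xs else x :: pvDedup x xs

theorem pvEmpty_le (s : String) : "" ≤ s := by
  rw [String.le_iff_toList_le]
  cases h : s.toList with
  | nil => simp
  | cons c t => exact le_of_lt (List.nil_lt_cons c t)

-- on a sorted list bounded below by p, the adjacent dedup keeps exactly the
-- elements other than p, each once, in strictly increasing order
theorem pvDedup_spec (xs : List String) : ∀ p, xs.Pairwise (· ≤ ·) → (∀ y ∈ xs, p ≤ y) →
    ((∀ y, y ∈ pvDedup p xs ↔ (y ∈ xs ∧ y ≠ p)) ∧ (pvDedup p xs).Pairwise (· < ·)) := by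
  induction xs with
  | nil => intro p _ _; simp [pvDedup]
  | cons x t ih =>
    intro p hp hlb
    rcases List.pairwise_cons.mp hp with ⟨hxle, ht⟩
    by_cases hx : x = p
    · subst hx
      obtain ⟨hm, hpw⟩ := ih x ht hxle
      have hD : pvDedup x (x :: t) = pvDedup x t := by simp [pvDedup]
      refine ⟨?_, by rw [hD]; exact hpw⟩
      intro y
      rw [hD, hm]
      constructor
      · rintro ⟨h1, h2⟩; exact ⟨List.mem_cons_of_mem _ h1, h2⟩
      · rintro ⟨h1, h2⟩
        rcases List.mem_cons.mp h1 with h | h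
        · exact absurd h h2
        · exact ⟨h, h2⟩
    · have hpx : p < x := lt_of_le_of_ne (hlb x (by simp)) (Ne.symm hx)
      obtain ⟨hm, hpw⟩ := ih x ht hxle
      have hD : pvDedup p (x :: t) = x :: pvDedup x t := by simp [pvDedup, hx]
      constructor
      · intro y
        rw [hD, List.mem_cons, hm, List.mem_cons]
        constructor
        · rintro (h1 | ⟨h1, h2⟩)
          · exact ⟨Or.inl h1, by rw [h1]; exact hx⟩
          · exact ⟨Or.inr h1, ne_of_gt (lt_of_lt_of_le hpx (hxle y h1))⟩
        · rintro ⟨h1 | h1, h2⟩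
          · exact Or.inl h1
          · by_cases hyx : y = x
            · exact Or.inl hyx
            · exact Or.inr ⟨h1, hyx⟩
      · rw [hD]
        refine List.pairwise_cons.mpr ⟨?_, hpw⟩
        intro y hy
        rcases (hm y).mp hy with ⟨h1, h2⟩
        exact lt_of_le_of_ne (hxle y h1) (Ne.symm h2)

-- B's scan over a list characterized: it appends one line and one dict insertion
-- per element of the adjacent dedup, with ids counted from k+1
theorem pvScan (xs : List String) : ∀ (p : String) (k : Int) (lines : List String) (d : PySem.Dict String Int),
    ∃ p' k',
      xs.foldl
        (fun (st : (List String × PySem.Dict String Int) × String × Int) n =>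
          if (n != st.2.1) = true then
            ((st.1.1 ++ [pvNetLine (st.2.2 + 1) n], st.1.2.insert n (st.2.2 + 1)), (n, st.2.2 + 1))
          else st)
        ((lines, d), (p, k))
      = ((lines ++ (PySem.List.enumerate (pvDedup p xs) k).map (fun q => pvNetLine (q.1 + 1) q.2),
          (PySem.List.enumerate (pvDedup p xs) k).foldl (fun d q => d.insert q.2 (q.1 + 1)) d),
         (p', k')) := by
  induction xs with
  | nil => intro p k lines d; exact ⟨p, k, by simp [pvDedup]⟩
  | cons x t ih =>
    intro p k lines d
    by_cases hx : x = p
    · obtain ⟨p', k', h⟩ := ih p k lines d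
      refine ⟨p', k', ?_⟩
      simpa [List.foldl_cons, hx, pvDedup] using h
    · obtain ⟨p', k', h⟩ := ih x (k + 1) (lines ++ [pvNetLine (k + 1) x]) (d.insert x (k + 1))
      refine ⟨p', k', ?_⟩
      have hne : (x != p) = true := by simp [hx]
      rw [List.foldl_cons, if_pos hne, h]
      simp [pvDedup, if_neg hx]

theorem pvEnumerate_map_snd {α : Type} (xs : List α) (i : Int) :
    (PySem.List.enumerate xs i).map (·.2) = xs := by
  induction xs generalizing i with
  | nil => simp [PySem.List.enumerate]
  | cons x t ih => simp [PySem.List.enumerate, ih]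

theorem pvEnumerate_fst_lt {α : Type} (xs : List α) (i : Int) :
    (PySem.List.enumerate xs i).Pairwise (fun a b => a.1 < b.1)
      ∧ ∀ p ∈ PySem.List.enumerate xs i, i ≤ p.1 := by
  induction xs generalizing i with
  | nil => simp [PySem.List.enumerate]
  | cons x t ih =>
    refine ⟨List.pairwise_cons.mpr ⟨fun p hp => ?_, (ih (i+1)).1⟩, ?_⟩
    · have := (ih (i+1)).2 p hp; omega
    · intro p hp
      simp [PySem.List.enumerate] at hp
      rcases hp with h | h
      · simp [h]
      · have := (ih (i+1)).2 p h; omega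

theorem pvSorted_congr (xs ys : List String) (h : xs.Perm ys) :
    PySem.List.sorted xs (fun n => n) = PySem.List.sorted ys (fun n => n) := by
  have hp : (PySem.List.sorted xs (fun n => n) false).Perm (PySem.List.sorted ys (fun n => n) false) :=
    ((PySem.List.sorted_perm xs _ false).trans h).trans (PySem.List.sorted_perm ys _ false).symm
  exact hp.eq_of_pairwise (fun a b _ _ h1 h2 => le_antisymm h1 h2) (PySem.List.sorted_pairwise xs _) (PySem.List.sorted_pairwise ys _)

theorem pvA_set (comps : List (String × List (String × List (String × String)))) :
    comps.foldl (fun s p => ((pvPins p.2).map (·.2)).foldl (fun s net => s.add net) s) PySem.Set.empty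
      = PySem.Set.ofList (pvNets comps) := by
  simp [PySem.Set.ofList, pvNets, List.foldl_flatMap]

-- the adjacent dedup of the sorted multiset IS A's sorted set of non-empty nets
theorem pvDedup_eq_sorted_set (L : List String) :
    pvDedup "" (PySem.List.sorted L (fun n => n))
      = PySem.List.sorted (PySem.Set.ofList (L.filter (fun n => n != ""))) (fun n => n) := by
  set D := pvDedup "" (PySem.List.sorted L (fun n => n)) with hD
  set nl := PySem.List.sorted (PySem.Set.ofList (L.filter (fun n => n != ""))) (fun n => n) with hnl
  obtain ⟨hmemD, hDlt⟩ := pvDedup_spec (PySem.List.sorted L (fun n => n)) ""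
    (PySem.List.sorted_pairwise L _) (fun y _ => pvEmpty_le y)
  have hnlt : nl.Pairwise (· < ·) := PySem.List.sorted_ofList_pairwise_lt _
  have hDnd : D.Nodup := hDlt.imp ne_of_lt
  have hnnd : nl.Nodup := hnlt.imp ne_of_lt
  have hmem : ∀ y, y ∈ D ↔ y ∈ nl := by
    intro y
    rw [hD, hmemD y, PySem.List.mem_sorted, hnl, PySem.List.mem_sorted, PySem.Set.mem_ofList,
        List.mem_filter]
    simp
  have hperm : D.Perm nl := (List.perm_ext_iff_of_nodup hDnd hnnd).mpr hmem
  exact hperm.eq_of_pairwise (fun a b _ _ h1 h2 => ((lt_irrefl a) (h1.trans h2)).elim) hDlt hnlt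

theorem pvMain (comps : List (String × List (String × List (String × String)))) :
    build_net_table comps = build_net_table_alt comps := by
  simp only [build_net_table, build_net_table_alt, pvA_set]
  have hBnets : comps.foldl (fun acc p => acc ++ (pvPins p.2).map (·.2)) [] = pvNets comps := by
    rw [PySem.List.foldl_append_eq_flatMap]; rfl
  rw [hBnets]
  -- the two sorted net lists coincide
  have hperm : ((PySem.Set.ofList (pvNets comps)).discard "").Perm
      (PySem.Set.ofList ((pvNets comps).filter (fun n => n != ""))) := by
    refine (List.perm_ext_iff_of_nodup ((PySem.Set.nodup_ofList _).filter _) (PySem.Set.nodup_ofList _)).mpr ?_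
    intro a
    simp [List.mem_filter, PySem.Set.mem_ofList]
  rw [pvSorted_congr _ _ hperm]
  set nl := PySem.List.sorted (PySem.Set.ofList ((pvNets comps).filter (fun n => n != ""))) (fun n => n) with hnl
  have hmem : ∀ n ∈ nl, n ≠ "" := by
    intro n hn
    have := (PySem.List.sorted_perm (PySem.Set.ofList ((pvNets comps).filter (fun n => n != ""))) (fun n => n) false).mem_iff.mp hn
    have := (PySem.Set.mem_ofList _ _).mp this
    simp [List.mem_filter] at this
    exact this.2
  have hnd : nl.Nodup :=
    (PySem.List.sorted_perm _ _ false).nodup_iff.mpr (PySem.Set.nodup_ofList _)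
  set e := PySem.List.enumerate nl 0 with he
  -- dict after A's enumerate loop
  have h1 : ((PySem.List.enumerate nl 0).foldl (fun d p => d.insert p.2 (p.1 + 1)) PySem.Dict.empty).items
      = e.map (fun p => (p.2, p.1 + 1)) := by
    exact PySem.Dict.items_foldl_insert_fresh e (·.2) (fun p => p.1 + 1) PySem.Dict.empty
      (fun a _ => by simp [PySem.Dict.contains, PySem.Dict.empty])
      (by rw [pvEnumerate_map_snd]; exact hnd)
  have hcont : (((PySem.List.enumerate nl 0).foldl (fun d p => d.insert p.2 (p.1 + 1)) PySem.Dict.empty)).contains "" = false := by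
    simp only [PySem.Dict.contains, h1]
    simp only [List.any_eq_false]
    intro p hp
    simp only [List.mem_map] at hp
    obtain ⟨q, hq, rfl⟩ := hp
    have : q.2 ∈ nl := by
      have := List.mem_map_of_mem (f := (·.2)) hq
      rwa [pvEnumerate_map_snd] at this
    simpa using hmem _ this
  have hins : ∀ (d : PySem.Dict String Int), d.contains "" = false → (d.insert "" 0).items = d.items ++ [("", 0)] := by
    intro d h; simp [PySem.Dict.insert, h]
  have h2 : (((PySem.List.enumerate nl 0).foldl (fun d p => d.insert p.2 (p.1 + 1)) PySem.Dict.empty).insert "" 0).items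
      = e.map (fun p => (p.2, p.1 + 1)) ++ [("", 0)] := by
    rw [hins _ hcont, h1]
  rw [h2]
  -- A's sort by id puts the net-0 entry first and keeps the rest
  have h3 : PySem.List.sorted (e.map (fun p => (p.2, p.1 + 1)) ++ [(("" : String), (0 : Int))]) (fun x => x.2)
      = ("", 0) :: e.map (fun p => (p.2, p.1 + 1)) := by
    apply PySem.List.sorted_eq_of_perm_of_pairwise_lt
    · exact (List.perm_append_singleton _ _).symm
    · refine List.pairwise_cons.mpr ⟨?_, ?_⟩
      · intro p hp
        simp only [List.mem_map] at hp
        obtain ⟨q, hq, rfl⟩ := hp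
        have := (pvEnumerate_fst_lt nl 0).2 q hq
        simpa using by omega
      · refine List.Pairwise.map _ ?_ (pvEnumerate_fst_lt nl 0).1
        intro a b h
        simpa using by omega
  rw [h3]
  -- A's line loop
  have h4 : (("", (0:Int)) :: e.map (fun p => (p.2, p.1 + 1))).foldl
      (fun ls p => if (p.1 != "") = true then ls ++ [pvNetLine p.2 p.1] else ls)
      ["\t(net 0 \"\")"]
      = ["\t(net 0 \"\")"] ++ e.map (fun p => pvNetLine (p.1 + 1) p.2) := by
    have hgen : (("", (0:Int)) :: e.map (fun p => (p.2, p.1 + 1))).foldl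
        (fun ls p => if (p.1 != "") = true then ls ++ [pvNetLine p.2 p.1] else ls)
        ["\t(net 0 \"\")"]
        = ["\t(net 0 \"\")"] ++ (((("", (0:Int)) :: e.map (fun p => (p.2, p.1 + 1))).filter (fun x => x.1 != "")).map (fun p => pvNetLine p.2 p.1)) :=
      PySem.List.foldl_append_if (fun (x : String × Int) => x.1 != "") (fun (p : String × Int) => pvNetLine p.2 p.1) _ _
    rw [hgen]
    congr 1
    rw [List.filter_cons_of_neg (by simp), List.filter_map, List.map_map]
    have : List.filter ((fun x => x.1 != "") ∘ fun p => (p.2, p.1 + 1)) e = e := by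
      refine List.filter_eq_self.mpr fun q hq => ?_
      have : q.2 ∈ nl := by
        have := List.mem_map_of_mem (f := (·.2)) hq
        rwa [pvEnumerate_map_snd] at this
      simpa using hmem _ this
    rw [this]
    simp [Function.comp]
  rw [h4]
  -- B's scan over the sorted multiset produces the very same lines and dict
  obtain ⟨p', k', hscan⟩ := pvScan (PySem.List.sorted (pvNets comps) (fun n => n)) "" 0
    ["\t(net 0 \"\")"] PySem.Dict.empty
  rw [hscan, pvDedup_eq_sorted_set, ← hnl, ← he, h2]

-- ===== VERDICT (by name: the statement is the Claim_ definition above) =====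
theorem build_net_table_spec : Claim_equal_build_net_table := by
  intro comps _ _
  exact pvMain comps
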